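-- pv_equiv track=rewrite | github.com/hyungyugod/study-coding-test | 프로그래머스/0/120863. 다항식 더하기/다항식 더하기.py | solution
-- ===== SOURCE A (Python) =====
-- def solution(polynomial):
--     a = 0
--     b = 0
--     polynomial_x = polynomial.split(" + ")
--     for i in polynomial_x:
--         if i.isnumeric():
--             b += int(i)
--         else:
--             i_x = i.replace("x","")
--             if i_x == "":
--                 a += 1
--             else:
--                 a += int(i_x)
--     if a == 0:
--         answer = str(b)
--     elif b == 0:
--         answer = f"{a}x"
--         if a == 1:
--             answer = "x"
--     else:
--         answer = f"{a}x + {b}"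
--         if a == 1:
--             answer = f"x + {b}"
--
--     return answer
-- ===== SOURCE B (Python) =====
-- def solution(polynomial):
--     # single fused char-level scan: no split/replace/isnumeric; terms are
--     # absorbed into the accumulators the moment a " + " separator is seen
--     def absorb(term, a, b):
--         if term and all("0" <= c <= "9" for c in term):
--             return a, b + int("".join(term))
--         body = [c for c in term if c != "x"]
--         if not body:
--             return a + 1, b
--         return a + int("".join(body)), b
--
--     a = b = 0
--     cur = []
--     i, n = 0, len(polynomial)
--     while i < n:
--         if polynomial[i : i + 3] == " + ":
--             a, b = absorb(cur, a, b)
--             cur = []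
--             i += 3
--         else:
--             cur.append(polynomial[i])
--             i += 1
--     a, b = absorb(cur, a, b)
--
--     parts = []
--     if a:
--         parts.append("x" if a == 1 else str(a) + "x")
--     if b:
--         parts.append(str(b))
--     return " + ".join(parts) or "0"
-- ===== Notes on version B (the rewrite author's own statement) =====
-- stated objective: alternative
-- what changed: Replaces A's split/replace/isnumeric pipeline (build the term list, fold an (a,b) accumulator over it, then an if/elif/else formatting cascade) with a single fused character-level scan that matches the three-character separator by hand, filters the variable letter and tests digits per character, absorbing each term into the accumulators as soon as its separator is seen, and renders via a flat parts list joined with the separator, falling back to the zero string.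
import Mathlib
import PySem

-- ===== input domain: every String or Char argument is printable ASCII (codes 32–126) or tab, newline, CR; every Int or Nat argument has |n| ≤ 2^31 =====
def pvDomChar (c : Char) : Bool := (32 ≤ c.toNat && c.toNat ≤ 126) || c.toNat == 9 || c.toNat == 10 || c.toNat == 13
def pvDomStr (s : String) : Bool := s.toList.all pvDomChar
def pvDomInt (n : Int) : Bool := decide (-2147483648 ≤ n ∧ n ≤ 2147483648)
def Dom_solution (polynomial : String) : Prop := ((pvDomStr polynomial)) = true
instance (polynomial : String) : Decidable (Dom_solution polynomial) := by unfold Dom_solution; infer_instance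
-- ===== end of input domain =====

-- B replaces A's split-then-loop-then-branch-cascade pipeline by a single fused
-- char-level scan (manual separator matching, per-char digit test and x-filtering)
-- plus a parts/join renderer ('alternative' objective); equivalence over Pre_.

-- ===== PORT A =====
-- the body of A's for-loop, folding the state (a, b) over the split terms
-- (i.isnumeric() ported as strIsdigit: identical on the ASCII domain;
--  int(...) ported as (ofStr? ...).getD 0 — Pre_ guarantees the parse succeeds)
def solutionStep (ab : Int × Int) (i : String) : Int × Int :=
  if PySem.Str.strIsdigit i then (ab.1, ab.2 + (PySem.Int.ofStr? i).getD 0)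
  else
    let i_x := PySem.Str.replace i "x" ""
    if i_x = "" then (ab.1 + 1, ab.2)
    else (ab.1 + (PySem.Int.ofStr? i_x).getD 0, ab.2)

def solution (polynomial : String) : String :=
  let polynomial_x := (PySem.Str.split? polynomial " + ").getD []  -- sep ≠ "", so split? is some
  let ab := polynomial_x.foldl solutionStep (0, 0)
  let a := ab.1
  let b := ab.2
  if a = 0 then PySem.Int.toStr b
  else if b = 0 then (if a = 1 then "x" else PySem.Int.toStr a ++ "x")
  else if a = 1 then "x + " ++ PySem.Int.toStr b
  else PySem.Int.toStr a ++ "x + " ++ PySem.Int.toStr b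

-- ===== PORT B =====
-- Source B's absorb(term, a, b): per-char digit test, x-filtering, int("".join(...))
-- ported as ofChars? of the same char list (join of single chars is that string)
def absorbB (ab : Int × Int) (term : List Char) : Int × Int :=
  if !term.isEmpty && term.all PySem.Chars.isdigit then   -- '0' <= c <= '9' IS PySem.Chars.isdigit
    (ab.1, ab.2 + (PySem.Int.ofChars? term).getD 0)
  else
    let body := term.filter (fun c => c ≠ 'x')
    if body.isEmpty then (ab.1 + 1, ab.2)
    else (ab.1 + (PySem.Int.ofChars? body).getD 0, ab.2)

-- Source B's while loop: scan the chars once; the slice comparison against the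
-- separator is the three-char prefix test; the current term is absorbed there
def scanB : List Char → List Char → Int × Int → Int × Int
  | [], cur, ab => absorbB ab cur
  | c :: rest, cur, ab =>
    if [' ', '+', ' '].isPrefixOf (c :: rest) then
      scanB ((c :: rest).drop 3) [] (absorbB ab cur)
    else scanB rest (cur ++ [c]) ab
  termination_by l => l.length
  decreasing_by
    · simp only [List.length_drop, List.length_cons]; omega
    · simp

def solution_alt (polynomial : String) : String :=
  let ab := scanB polynomial.toList [] (0, 0)
  let a := ab.1
  let b := ab.2
  let parts :=
    (if a ≠ 0 then [if a = 1 then "x" else PySem.Int.toStr a ++ "x"] else []) ++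
    (if b ≠ 0 then [PySem.Int.toStr b] else [])
  let j := PySem.Str.join " + " parts
  if j = "" then "0" else j   -- join with fallback to the zero string

-- ===== PRECONDITION & SPEC =====
-- Pre_ excludes exactly the inputs on which A raises ValueError: a term that is not
-- numeric and whose x-stripped remainder is neither empty nor a valid int literal.
def Pre_solution (polynomial : String) : Prop :=
  ∀ t ∈ (PySem.Str.split? polynomial " + ").getD [],
    PySem.Str.strIsdigit t = true ∨ PySem.Str.replace t "x" "" = "" ∨
    (PySem.Int.ofStr? (PySem.Str.replace t "x" "")).isSome = true
instance (polynomial : String) : Decidable (Pre_solution polynomial) := by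
  unfold Pre_solution; infer_instance
def pvWitness_solution : String := "3x + 7 + x"

def Spec_solution (polynomial : String) (out : String) : Prop := out = solution_alt polynomial
instance (polynomial : String) (out : String) : Decidable (Spec_solution polynomial out) := by unfold Spec_solution; infer_instance

-- ===== CLAIM (what is proved, stated in full; the proofs are below) =====
def Claim_equal_solution : Prop := ∀ (polynomial : String), Dom_solution polynomial → Pre_solution polynomial → Spec_solution polynomial (solution polynomial)

-- ===== LEMMAS AND PROOFS =====

lemma toDigitsCore_ne_nil (b f n : Nat) (l : List Char) (h : l ≠ []) :
    Nat.toDigitsCore b f n l ≠ [] := by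
  induction f generalizing n l with
  | zero => simpa [Nat.toDigitsCore]
  | succ f ih =>
    simp only [Nat.toDigitsCore]
    split
    · simp
    · exact ih _ _ (by simp)

lemma toDigitsCore_succ_ne_nil (b f n : Nat) (l : List Char) :
    Nat.toDigitsCore b (f + 1) n l ≠ [] := by
  simp only [Nat.toDigitsCore]
  split
  · simp
  · exact toDigitsCore_ne_nil _ _ _ _ (by simp)

lemma toStr_ne_empty (n : Int) : PySem.Int.toStr n ≠ "" := by
  intro h
  have h' := congrArg String.toList h
  simp only [PySem.Int.toList_toStr, PySem.Int.toChars] at h'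
  split_ifs at h' with hn
  · simp at h'
  · rw [show ("" : String).toList = [] from rfl] at h'
    exact toDigitsCore_succ_ne_nil 10 n.toNat n.toNat [] (by simpa [Nat.toDigits] using h')

lemma append_ne_empty_right (s t : String) (h : t ≠ "") : s ++ t ≠ "" := by
  intro he
  have h' := congrArg String.toList he
  rw [String.toList_append, show ("" : String).toList = [] from rfl] at h'
  rcases List.append_eq_nil_iff.mp h' with ⟨-, h2⟩
  exact h (String.toList_inj.mp (by simpa using h2))

lemma join_singleton (s : String) : PySem.Str.join " + " [s] = s := by
  simp [PySem.Str.join, PySem.Chars.join, List.intercalate]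

lemma join_pair (s t : String) : PySem.Str.join " + " [s, t] = s ++ " + " ++ t := by
  apply String.toList_inj.mp
  simp [PySem.Str.join, PySem.Chars.join, List.intercalate, String.toList_append]

-- replace with old = "x", new = "" is the x-filter
lemma replaceGo_x (fuel : Nat) (l acc : List Char) (h : l.length ≤ fuel) :
    PySem.Chars.replace.go ['x'] [] fuel l acc
      = acc.reverse ++ l.filter (fun c => c ≠ 'x') := by
  induction fuel generalizing l acc with
  | zero =>
    have : l = [] := by cases l <;> simp_all
    subst this; simp [PySem.Chars.replace.go]
  | succ f ih =>
    cases l with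
    | nil => simp [PySem.Chars.replace.go]
    | cons c t =>
      rw [PySem.Chars.replace.go]
      by_cases hc : c = 'x'
      · subst hc
        simp only [List.isPrefixOf, BEq.rfl, Bool.and_self, if_pos]
        rw [ih _ _ (by simpa using Nat.le_of_succ_le_succ h)]
        simp
      · have hp : (['x'].isPrefixOf (c :: t)) = false := by
          simp [List.isPrefixOf]; exact fun hx => absurd hx.symm hc
        simp only [hp, Bool.false_eq_true, if_false]
        rw [ih _ _ (by simpa using Nat.le_of_succ_le_succ h)]
        simp [hc]

lemma replace_x (t : List Char) :
    PySem.Chars.replace t ['x'] [] = t.filter (fun c => c ≠ 'x') := by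
  simp only [PySem.Chars.replace, List.isEmpty_cons, Bool.false_eq_true, if_false]
  simpa using replaceGo_x t.length t [] le_rfl

-- A's per-term loop body on a token equals Source B's absorb on its char list
lemma absorb_eq (ab : Int × Int) (t : List Char) :
    solutionStep ab (String.ofList t) = absorbB ab t := by
  have hr : (PySem.Str.replace (String.ofList t) "x" "").toList
      = t.filter (fun c => c ≠ 'x') := by
    rw [PySem.Str.toList_replace]
    simpa using replace_x t
  simp only [solutionStep, absorbB, PySem.Str.strIsdigit, String.toList_ofList,
    PySem.Chars.strIsdigit, PySem.Int.ofStr?, hr]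
  by_cases hd : (!t.isEmpty && t.all PySem.Chars.isdigit) = true
  · rw [if_pos hd, if_pos hd]
  · rw [if_neg hd, if_neg hd]
    by_cases he : (t.filter (fun c => c ≠ 'x')) = []
    · rw [if_pos (by rw [← String.toList_inj, hr, he]; rfl),
          if_pos (by rw [he]; rfl)]
    · have hA : ¬ (PySem.Str.replace (String.ofList t) "x" "" = "") := by
        intro hh
        exact he (by rw [← hr, hh]; rfl)
      rw [if_neg hA, if_neg (by simpa [List.isEmpty_iff] using he)]

-- the general-accumulator law for PySem's split loop
lemma splitGo_acc (sep : List Char) (fuel : Nat) :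
    ∀ (l cur : List Char) (acc : List (List Char)),
      PySem.Chars.splitOn.go sep fuel l cur acc
        = acc.reverse ++ PySem.Chars.splitOn.go sep fuel l cur [] := by
  induction fuel with
  | zero =>
    intro l cur acc
    rw [PySem.Chars.splitOn.go.eq_def, PySem.Chars.splitOn.go.eq_def]
    simp
  | succ f ih =>
    intro l cur acc
    cases l with
    | nil =>
      rw [PySem.Chars.splitOn.go.eq_def, PySem.Chars.splitOn.go.eq_def]
      simp
    | cons c rest =>
      rw [PySem.Chars.splitOn.go.eq_def, PySem.Chars.splitOn.go.eq_def]
      simp only []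
      by_cases hp : sep.isPrefixOf (c :: rest) = true
      · simp only [hp, if_true]
        rw [ih _ _ (cur.reverse :: acc), ih _ _ [cur.reverse]]
        simp
      · simp only [hp, Bool.false_eq_true, if_false]
        exact ih _ _ acc

-- B's fused scanner equals folding absorb over PySem's token list
lemma scan_go (fuel : Nat) :
    ∀ (l cur : List Char) (ab : Int × Int), l.length ≤ fuel →
      scanB l cur ab
        = List.foldl absorbB ab
            (PySem.Chars.splitOn.go [' ', '+', ' '] fuel l cur.reverse []) := by
  induction fuel with
  | zero =>
    intro l cur ab h
    have : l = [] := by cases l <;> simp_all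
    subst this
    rw [PySem.Chars.splitOn.go.eq_def]
    simp [scanB]
  | succ f ih =>
    intro l cur ab h
    cases l with
    | nil =>
      rw [PySem.Chars.splitOn.go.eq_def]
      simp [scanB]
    | cons c rest =>
      rw [PySem.Chars.splitOn.go.eq_def, scanB]
      simp only []
      by_cases hp : ([' ', '+', ' '] : List Char).isPrefixOf (c :: rest) = true
      · simp only [hp, if_true]
        rw [splitGo_acc, ih ((c :: rest).drop 3) [] (absorbB ab cur)
            (by simp only [List.length_drop, List.length_cons] at h ⊢; omega)]
        simp
      · simp only [hp, Bool.false_eq_true, if_false]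
        rw [ih rest (cur ++ [c]) ab (by simpa using Nat.le_of_succ_le_succ h)]
        simp

lemma scan_eq (s : String) :
    scanB s.toList [] (0, 0)
      = List.foldl absorbB (0, 0) (PySem.Chars.splitOn s.toList [' ', '+', ' ']) := by
  rw [PySem.Chars.splitOn]
  exact scan_go (s.toList.length + 1) s.toList [] (0, 0) (by omega)

-- A's token list is the String image of PySem's char-level token list
lemma tokens_eq (s : String) :
    (PySem.Str.split? s " + ").getD []
      = (PySem.Chars.splitOn s.toList [' ', '+', ' ']).map String.ofList := by
  rw [PySem.Str.split?, PySem.Chars.split?]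
  rfl

-- the two accumulated pairs coincide
lemma pair_eq (s : String) :
    ((PySem.Str.split? s " + ").getD []).foldl solutionStep (0, 0)
      = scanB s.toList [] (0, 0) := by
  rw [tokens_eq, scan_eq, List.foldl_map]
  congr 1
  funext ab t
  exact absorb_eq ab t

-- the two output formatters agree for every accumulated (a, b)
lemma format_eq (a b : Int) :
    (if a = 0 then PySem.Int.toStr b
     else if b = 0 then (if a = 1 then "x" else PySem.Int.toStr a ++ "x")
     else if a = 1 then "x + " ++ PySem.Int.toStr b
     else PySem.Int.toStr a ++ "x + " ++ PySem.Int.toStr b) =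
    (let parts :=
       (if a ≠ 0 then [if a = 1 then "x" else PySem.Int.toStr a ++ "x"] else []) ++
       (if b ≠ 0 then [PySem.Int.toStr b] else [])
     let j := PySem.Str.join " + " parts
     if j = "" then "0" else j) := by
  by_cases ha : a = 0
  · by_cases hb : b = 0
    · subst ha hb; decide
    · simp only [ha, hb, if_true, if_false, ite_not]
      simp [join_singleton, toStr_ne_empty b]
  · by_cases hb : b = 0
    · by_cases h1 : a = 1
      · simp only [hb, h1]
        simp [join_singleton]
      · simp only [hb, h1, if_false, if_true, ite_not]
        simp [join_singleton, ha, append_ne_empty_right _ _ (by decide : ("x":String) ≠ "")]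
    · by_cases h1 : a = 1
      · subst h1
        simp [hb, join_pair]
      · simp [ha, hb, h1, join_pair,
          append_ne_empty_right (PySem.Int.toStr a ++ "x" ++ " + ") _ (toStr_ne_empty b)]
        apply String.toList_inj.mp
        simp [String.toList_append]

-- ===== VERDICT (by name: the statement is the Claim_ definition above) =====
theorem solution_spec : Claim_equal_solution := by
  intro polynomial _ _
  have h := format_eq (scanB polynomial.toList [] (0, 0)).1
    (scanB polynomial.toList [] (0, 0)).2
  unfold Spec_solution solution solution_alt
  simp only [pair_eq]
  exact h
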